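-- pv_equiv track=rewrite | github.com/GetPageSpeed/nginx-extras-docs | generate.py | ensure_one_h1
-- ===== SOURCE A (Python) =====
-- def ensure_one_h1(md):
--     # It is crucial for there to be only one heading or else TOC is not properly generated
--     out = []
--     seen_h1 = False
--     lines = md.splitlines()
--     for line in lines:
--         if line.startswith('# '):
--             if not seen_h1:
--                 seen_h1 = True
--             else:
--                 line = "## " + line.lstrip('# ')
--         out.append(line)
--     return "\n".join(out)
-- ===== SOURCE B (Python) =====
-- def ensure_one_h1(md):
--     # Split the line list at the first H1: everything up to and including it is
--     # kept verbatim; in the suffix, EVERY H1 is demoted unconditionally.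
--     lines = md.splitlines()
--     k = 0
--     while k < len(lines) and not lines[k].startswith('# '):
--         k += 1
--     head, tail = lines[:k + 1], lines[k + 1:]
--     demoted = ['## ' + l.lstrip('# ') if l.startswith('# ') else l for l in tail]
--     return '\n'.join(head + demoted)
-- ===== Notes on version B (the rewrite author's own statement) =====
-- stated objective: alternative
-- what changed: Replaces A's single pass with a per-line seen_h1 flag by a split-at-first-H1 decomposition: scan only until the first H1, slice the line list there, keep the prefix (including the anchor) verbatim and demote every H1 in the suffix unconditionally — no flag or anchor test in the transform.
import Mathlib
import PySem

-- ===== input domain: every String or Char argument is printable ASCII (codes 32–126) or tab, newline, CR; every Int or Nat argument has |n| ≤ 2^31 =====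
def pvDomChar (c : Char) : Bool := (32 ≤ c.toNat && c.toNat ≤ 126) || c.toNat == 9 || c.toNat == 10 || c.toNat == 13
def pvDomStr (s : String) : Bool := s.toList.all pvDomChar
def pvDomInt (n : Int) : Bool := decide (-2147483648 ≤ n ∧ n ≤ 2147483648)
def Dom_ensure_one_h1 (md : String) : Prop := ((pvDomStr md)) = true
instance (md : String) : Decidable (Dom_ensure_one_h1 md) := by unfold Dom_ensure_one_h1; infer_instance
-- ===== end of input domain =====

-- B replaces A's flag loop by splitting the line list at the first H1: prefix kept verbatim, every H1 in the suffix demoted unconditionally (objective: alternative decomposition, same cost).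

-- Exact port of the shared Python expression "## " + line.lstrip('# ')
-- (lstrip('# ') drops leading '#' and ' ' characters; exact, hand-ported as dropWhile).
def pyDemoteH1 (s : String) : String :=
  String.ofList ('#' :: '#' :: ' ' :: s.toList.dropWhile (fun c => c == '#' || c == ' '))

-- ===== PORT A =====
def ensure_one_h1 (md : String) : String :=
  let st := (PySem.Str.splitlines md).foldl
    (fun (st : List String × Bool) line =>
      if PySem.Str.startswith line "# " then
        if st.2 = false then (st.1 ++ [line], true)
        else (st.1 ++ [pyDemoteH1 line], st.2)
      else (st.1 ++ [line], st.2))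
    ([], false)
  PySem.Str.join "\n" st.1

-- ===== PORT B =====
-- the while loop: walk forward until the first H1 line, counting steps
def pyFindH1 (lines : List String) : Nat :=
  match lines with
  | [] => 0
  | l :: ls => if PySem.Str.startswith l "# " then 0 else pyFindH1 ls + 1

def ensure_one_h1_alt (md : String) : String :=
  let lines := PySem.Str.splitlines md
  let k := pyFindH1 lines
  -- lines[:k+1] / lines[k+1:] with a nonnegative bound = take / drop (exact)
  let head := lines.take (k + 1)
  let tail := lines.drop (k + 1)
  let demoted := tail.map (fun l =>
    if PySem.Str.startswith l "# " then pyDemoteH1 l else l)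
  PySem.Str.join "\n" (head ++ demoted)

-- ===== PRECONDITION & SPEC =====
def Spec_ensure_one_h1 (md : String) (out : String) : Prop := out = ensure_one_h1_alt md
instance (md : String) (out : String) : Decidable (Spec_ensure_one_h1 md out) := by unfold Spec_ensure_one_h1; infer_instance

-- ===== CLAIM =====
def Claim_equal_ensure_one_h1 : Prop := ∀ (md : String), Dom_ensure_one_h1 md → Spec_ensure_one_h1 md (ensure_one_h1 md)

-- ===== LEMMAS AND PROOFS =====

-- A's loop as a pure recursion (proof helper, not a port).
def goA (ls : List String) (seen : Bool) : List String :=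
  match ls with
  | [] => []
  | l :: ls =>
    if PySem.Str.startswith l "# " then
      if seen = false then l :: goA ls true
      else pyDemoteH1 l :: goA ls seen
    else l :: goA ls seen

theorem foldA_eq (ls : List String) (acc : List String) (seen : Bool) :
    (ls.foldl
      (fun (st : List String × Bool) line =>
        if PySem.Str.startswith line "# " then
          if st.2 = false then (st.1 ++ [line], true)
          else (st.1 ++ [pyDemoteH1 line], st.2)
        else (st.1 ++ [line], st.2))
      (acc, seen)).1 = acc ++ goA ls seen := by
  induction ls generalizing acc seen with
  | nil => simp [goA]
  | cons l ls ih =>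
    simp only [List.foldl_cons, goA]
    cases h : PySem.Str.startswith l "# " <;> cases seen <;>
      simp only [h, Bool.false_eq_true, if_true, if_false, Bool.true_eq_false] <;>
      rw [ih] <;> simp

theorem goA_true (ls : List String) :
    goA ls true = ls.map (fun l => if PySem.Str.startswith l "# " then pyDemoteH1 l else l) := by
  induction ls with
  | nil => rfl
  | cons l ls ih =>
    simp only [goA, Bool.true_eq_false, if_false, List.map_cons, ih]
    split <;> rfl

theorem goA_eq_B (ls : List String) :
    goA ls false =
      ls.take (pyFindH1 ls + 1) ++
        (ls.drop (pyFindH1 ls + 1)).map (fun l =>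
          if PySem.Str.startswith l "# " then pyDemoteH1 l else l) := by
  induction ls with
  | nil => simp [goA, pyFindH1]
  | cons l ls ih =>
    cases h : PySem.Str.startswith l "# "
    case false =>
      simp only [goA, h, Bool.false_eq_true, if_false, pyFindH1, List.take_succ_cons,
        List.drop_succ_cons]
      simp only [PySem.Str.startswith, show ("# " : String).toList = ['#', ' '] from rfl] at h
      simp only [PySem.Str.startswith, h, Bool.false_eq_true, if_false]
      rw [ih, List.cons_append]
      rfl
    case true =>
      simp only [PySem.Str.startswith, show ("# " : String).toList = ['#', ' '] from rfl] at h
      simp [goA, PySem.Str.startswith, h, pyFindH1, goA_true]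

-- ===== VERDICT =====
theorem ensure_one_h1_spec : Claim_equal_ensure_one_h1 := by
  intro md _
  unfold Spec_ensure_one_h1 ensure_one_h1 ensure_one_h1_alt
  simp only
  congr 1
  rw [foldA_eq _ [] false, List.nil_append]
  exact goA_eq_B (PySem.Str.splitlines md)
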